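-- pv_equiv track=rewrite | github.com/BU-DEPEND-Lab/REGLO | ITNE_model/Model_ITNE.py | get_outbounds
-- ===== SOURCE A (Python) =====
-- def get_outbounds(graph, out_layer_id):
--     related_layers = set()
--     q = [out_layer_id]
--     while q:
--         q_new = []
--         for out_id in q:
--             for in_id in graph[out_id]:
--                 if in_id not in related_layers:
--                     related_layers.add(in_id)
--                     if in_id >= 0:
--                         q_new.append(in_id)
--         q = q_new
--     outbounds = {}
--     for i in related_layers:
--         outbounds[i] = 0
--     related_layers.add(out_layer_id)
--     for out_id in related_layers:
--         if out_id < 0: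
--             continue
--         for in_id in graph[out_id]:
--             outbounds[in_id] += 1
--
--     return outbounds
-- ===== SOURCE B (Python) =====
-- def get_outbounds(graph, out_layer_id):
--     # Single fused BFS: counts in-degrees while traversing (no second pass over the reachable set).
--     outbounds = {}
--     visited = {out_layer_id}
--     queue = [out_layer_id]
--     i = 0
--     while i < len(queue):
--         src = queue[i]
--         i += 1
--         for nb in graph[src]:
--             outbounds.setdefault(nb, 0)
--             if src >= 0:
--                 outbounds[nb] += 1
--             if nb >= 0 and nb not in visited:
--                 visited.add(nb)
--                 queue.append(nb)
--     return outbounds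
-- ===== Notes on version B (the rewrite author's own statement) =====
-- stated objective: simpler
-- what changed: A's two-phase structure (layered BFS collecting the reachable set, then a second scan of that set re-reading every adjacency list to count in-degrees) is replaced by one fused FIFO BFS seeded with out_layer_id in the visited set, which zero-initializes and counts each neighbour while traversing, so the second pass over the reachable set disappears.
import Mathlib
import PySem

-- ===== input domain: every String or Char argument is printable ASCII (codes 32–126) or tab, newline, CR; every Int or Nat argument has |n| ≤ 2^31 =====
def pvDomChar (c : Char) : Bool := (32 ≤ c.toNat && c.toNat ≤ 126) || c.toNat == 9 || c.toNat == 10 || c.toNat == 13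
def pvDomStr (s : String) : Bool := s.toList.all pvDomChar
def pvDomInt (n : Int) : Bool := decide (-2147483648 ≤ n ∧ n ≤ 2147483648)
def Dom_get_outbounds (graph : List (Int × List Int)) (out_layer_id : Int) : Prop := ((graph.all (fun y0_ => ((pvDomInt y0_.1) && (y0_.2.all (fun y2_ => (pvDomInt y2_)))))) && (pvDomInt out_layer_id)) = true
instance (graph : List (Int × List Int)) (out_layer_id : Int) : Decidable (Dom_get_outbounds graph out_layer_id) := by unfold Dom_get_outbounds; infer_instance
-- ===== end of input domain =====

-- B replaces A's two phases (layered BFS collecting the reachable set, then a second scan counting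
-- in-degrees) by one fused FIFO BFS that counts while it traverses; same return value.
-- (The Python A iterates a set to build the returned dict, so its key ORDER is hash order; dict
-- outputs are compared as key→value maps, and both ports emit keys in first-discovery order.)

-- neighbours lookup graph[x] (Python dict lookup; KeyError outside Pre_)
def pvNbs (graph : List (Int × List Int)) (x : Int) : List Int :=
  (PySem.Dict.mk graph).getD x []

-- shared fuel bound for the while-loops (a termination device only; proved-irrelevant slack)
def pvFuel (graph : List (Int × List Int)) : Nat :=
  (graph.flatMap (fun p => p.2)).length + 2

-- ===== PORT A =====
-- inner 'for in_id in graph[out_id]' body of A's BFS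
def getOutboundsInner (graph : List (Int × List Int))
    (st : PySem.Set Int × List Int) (out_id : Int) : PySem.Set Int × List Int :=
  (pvNbs graph out_id).foldl
    (fun st in_id =>
      if PySem.Set.contains st.1 in_id then st
      else (PySem.Set.add st.1 in_id, if 0 ≤ in_id then st.2 ++ [in_id] else st.2))
    st

-- 'while q:' layered BFS of A
def getOutboundsBFS (graph : List (Int × List Int)) :
    Nat → PySem.Set Int → List Int → PySem.Set Int
  | _, related, [] => related
  | 0, related, _ => related
  | fuel + 1, related, q =>
      let st := q.foldl (getOutboundsInner graph) (related, [])
      getOutboundsBFS graph fuel st.1 st.2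

def get_outbounds (graph : List (Int × List Int)) (out_layer_id : Int) : List (Int × Int) :=
  let related := getOutboundsBFS graph (pvFuel graph) PySem.Set.empty [out_layer_id]
  let outbounds : PySem.Dict Int Int :=
    related.foldl (fun d i => d.insert i 0) PySem.Dict.empty
  let related2 := PySem.Set.add related out_layer_id
  let final := related2.foldl
    (fun d out_id =>
      if out_id < 0 then d
      else (pvNbs graph out_id).foldl (fun d in_id => d.modify in_id 0 (fun t => t + 1)) d)
    outbounds
  final.items

-- ===== PORT B =====
-- fused BFS loop of Source B: pops src, setdefaults/increments outbounds, enqueues new nonneg nodes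
def getOutboundsAltLoop (graph : List (Int × List Int)) :
    Nat → PySem.Set Int → PySem.Dict Int Int → List Int → PySem.Dict Int Int
  | _, _, outb, [] => outb
  | 0, _, outb, _ => outb
  | fuel + 1, visited, outb, src :: rest =>
      let st := (pvNbs graph src).foldl
        (fun (st : PySem.Set Int × PySem.Dict Int Int × List Int) nb =>
          let o := PySem.Dict.setdefault st.2.1 nb 0
          let o := if 0 ≤ src then o.modify nb 0 (fun t => t + 1) else o
          if 0 ≤ nb ∧ ¬ PySem.Set.contains st.1 nb
          then (PySem.Set.add st.1 nb, o, st.2.2 ++ [nb])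
          else (st.1, o, st.2.2))
        (visited, outb, rest)
      getOutboundsAltLoop graph fuel st.1 st.2.1 st.2.2

def get_outbounds_alt (graph : List (Int × List Int)) (out_layer_id : Int) : List (Int × Int) :=
  (getOutboundsAltLoop graph (pvFuel graph)
    (PySem.Set.add PySem.Set.empty out_layer_id) PySem.Dict.empty [out_layer_id]).items

-- ===== PRECONDITION & SPEC =====
-- Pre_ excludes exactly the inputs where Python A raises KeyError: A looks up out_layer_id and
-- every non-negative node it reaches, so the domain is certified by a key subset S containing
-- out_layer_id and closed under non-negative neighbour steps. The Nodup conjunct only pins the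
-- association-list representation of the Python dict argument (whose keys are always distinct).
def Pre_get_outbounds (graph : List (Int × List Int)) (out_layer_id : Int) : Prop :=
  (graph.map Prod.fst).Nodup ∧
  ∃ S ∈ (graph.map Prod.fst).sublists, out_layer_id ∈ S ∧
    ∀ s ∈ S, ∀ y ∈ pvNbs graph s, 0 ≤ y → y ∈ S
instance (graph : List (Int × List Int)) (out_layer_id : Int) : Decidable (Pre_get_outbounds graph out_layer_id) := by unfold Pre_get_outbounds; infer_instance

def pvWitness_get_outbounds : (List (Int × List Int)) × Int :=
  ([(0, [1, -2]), (1, [0, 1])], 0)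

def Spec_get_outbounds (graph : List (Int × List Int)) (out_layer_id : Int) (out : List (Int × Int)) : Prop := out = get_outbounds_alt graph out_layer_id
instance (graph : List (Int × List Int)) (out_layer_id : Int) (out : List (Int × Int)) : Decidable (Spec_get_outbounds graph out_layer_id out) := by unfold Spec_get_outbounds; infer_instance

-- ===== CLAIM (what is proved, stated in full; the proofs are below) =====
def Claim_equal_get_outbounds : Prop := ∀ (graph : List (Int × List Int)) (out_layer_id : Int), Dom_get_outbounds graph out_layer_id → Pre_get_outbounds graph out_layer_id → Spec_get_outbounds graph out_layer_id (get_outbounds graph out_layer_id)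

-- ===== LEMMAS AND PROOFS =====

/- Throughout: `pvNbs g x` is the adjacency lookup both ports share; the per-neighbour step
   functions of the two BFS loops are characterised in closed form, the fused loop of B is
   related to A's layered loop by one coupled induction (`pvMaster`), and A's two extra passes
   are characterised separately. -/

-- A's per-neighbour step (the inner lambda of getOutboundsInner)
def pvStepA : (PySem.Set Int × List Int) → Int → (PySem.Set Int × List Int) :=
  fun st in_id =>
    if PySem.Set.contains st.1 in_id then st
    else (PySem.Set.add st.1 in_id, if 0 ≤ in_id then st.2 ++ [in_id] else st.2)

theorem pvInner_eq (g : List (Int × List Int)) (st : PySem.Set Int × List Int) (s : Int) :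
    getOutboundsInner g st s = (pvNbs g s).foldl pvStepA st := rfl

-- B's per-neighbour step (the inner lambda of getOutboundsAltLoop, src fixed)
def pvStepB (src : Int) :
    (PySem.Set Int × PySem.Dict Int Int × List Int) → Int →
    (PySem.Set Int × PySem.Dict Int Int × List Int) :=
  fun st nb =>
    let o := PySem.Dict.setdefault st.2.1 nb 0
    let o := if 0 ≤ src then o.modify nb 0 (fun t => t + 1) else o
    if 0 ≤ nb ∧ ¬ PySem.Set.contains st.1 nb
    then (PySem.Set.add st.1 nb, o, st.2.2 ++ [nb])
    else (st.1, o, st.2.2)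

-- newly enqueued values of a neighbour stream (A resp. B flavour)
def pvNewA (r : PySem.Set Int) (l : List Int) : List Int :=
  PySem.Set.ofList (l.filter (fun y => decide (y ∉ r ∧ 0 ≤ y)))
def pvNewB (v : PySem.Set Int) (l : List Int) : List Int :=
  PySem.Set.ofList (l.filter (fun y => decide (0 ≤ y ∧ y ∉ v)))

theorem pvContains_eq (r : PySem.Set Int) (y : Int) :
    PySem.Set.contains r y = decide (y ∈ r) := by
  by_cases h : y ∈ r
  · simp [(PySem.Set.contains_iff r y).2 h, h]
  · have : PySem.Set.contains r y ≠ true := fun hc => h ((PySem.Set.contains_iff r y).1 hc)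
    simp [Bool.eq_false_iff.2 this, h]

theorem pvNotContains (r : PySem.Set Int) (y : Int) :
    (!PySem.Set.contains r y) = decide (y ∉ r) := by
  rw [pvContains_eq]; by_cases h : y ∈ r <;> simp [h]

-- list(dict.fromkeys) commutes with a value-filter
theorem pvOfListFilter (l : List Int) (p : Int → Bool) :
    (PySem.Set.ofList l).filter p = PySem.Set.ofList (l.filter p) := by
  induction l with
  | nil => rfl
  | cons x xs ih =>
    rw [PySem.Set.ofList_cons]
    cases hp : p x
    · have h1 : List.filter p (x :: xs) = xs.filter p := by simp [hp]
      rw [h1, ← ih]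
      simp only [List.filter_cons, hp, cond_false, PySem.Set.discard, List.filter_filter]
      apply List.filter_congr
      intro y _
      by_cases hyx : y = x
      · subst hyx; simp [hp]
      · simp [hyx]
    · have h1 : List.filter p (x :: xs) = x :: xs.filter p := by simp [hp]
      rw [h1, PySem.Set.ofList_cons, ← ih]
      simp only [List.filter_cons, hp, PySem.Set.discard, List.filter_filter]
      simp [Bool.and_comm]

theorem pvUpdate_of_subset (s : PySem.Set Int) (xs : List Int) (h : ∀ y ∈ xs, y ∈ s) :
    PySem.Set.update s xs = s := by
  induction xs generalizing s with
  | nil => rfl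
  | cons x xs ih =>
    rw [PySem.Set.update_cons, PySem.Set.add_of_mem (h x (by simp))]
    exact ih s (fun y hy => h y (by simp [hy]))

-- characterisation of A's inner fold
theorem pvAfold (l : List Int) (r : PySem.Set Int) (q : List Int) :
    l.foldl pvStepA (r, q) = (PySem.Set.update r l, q ++ pvNewA r l) := by
  induction l generalizing r q with
  | nil => simp [pvNewA, PySem.Set.update_nil, PySem.Set.ofList_nil]
  | cons x xs ih =>
    by_cases hx : x ∈ r
    · have hstep : pvStepA (r, q) x = (r, q) := by
        simp [pvStepA, pvContains_eq, hx]
      have hnew : pvNewA r (x :: xs) = pvNewA r xs := by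
        simp [pvNewA, List.filter_cons, hx]
      rw [List.foldl_cons, hstep, ih, PySem.Set.update_cons, PySem.Set.add_of_mem hx, hnew]
    · have hadd : PySem.Set.add r x = r ++ [x] := PySem.Set.add_of_not_mem hx
      by_cases h0 : (0:Int) ≤ x
      · have hstep : pvStepA (r, q) x = (r ++ [x], q ++ [x]) := by
          simp [pvStepA, pvContains_eq, hx, hadd, h0]
        have hnew : pvNewA r (x :: xs) = x :: pvNewA (r ++ [x]) xs := by
          have hf : List.filter (fun y => decide (y ∉ r ∧ 0 ≤ y)) (x :: xs)
              = x :: xs.filter (fun y => decide (y ∉ r ∧ 0 ≤ y)) := by simp [hx, h0]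
          simp only [pvNewA]
          rw [hf, PySem.Set.ofList_cons]
          congr 1
          simp only [PySem.Set.discard, pvOfListFilter, List.filter_filter]
          congr 1
          apply List.filter_congr
          intro y _
          by_cases hyx : y = x
          · subst hyx; simp
          · simp [hyx]
        rw [List.foldl_cons, hstep, ih, PySem.Set.update_cons, hadd, hnew]
        simp
      · have hstep : pvStepA (r, q) x = (r ++ [x], q) := by
          simp [pvStepA, pvContains_eq, hx, hadd, h0]
        have hnew : pvNewA r (x :: xs) = pvNewA (r ++ [x]) xs := by
          have hf : List.filter (fun y => decide (y ∉ r ∧ 0 ≤ y)) (x :: xs)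
              = xs.filter (fun y => decide (y ∉ r ∧ 0 ≤ y)) := by simp [h0]
          simp only [pvNewA]
          rw [hf]
          congr 1
          apply List.filter_congr
          intro y _
          by_cases hyx : y = x
          · subst hyx; simp [h0]
          · simp [hyx]
        rw [List.foldl_cons, hstep, ih, PySem.Set.update_cons, hadd, hnew]

-- the counting-only effect of B's inner fold on the dict
def pvOl (src : Int) (l : List Int) (o : PySem.Dict Int Int) : PySem.Dict Int Int :=
  l.foldl (fun o nb =>
    let o1 := PySem.Dict.setdefault o nb 0
    if 0 ≤ src then o1.modify nb 0 (fun t => t + 1) else o1) o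

-- characterisation of B's inner fold
theorem pvBfold (l : List Int) (src : Int) (v : PySem.Set Int) (o : PySem.Dict Int Int)
    (q : List Int) :
    l.foldl (pvStepB src) (v, o, q) =
      (PySem.Set.update v (l.filter (fun y => decide (0 ≤ y))), pvOl src l o,
        q ++ pvNewB v l) := by
  induction l generalizing v o q with
  | nil => simp [pvNewB, pvOl, PySem.Set.update_nil, PySem.Set.ofList_nil]
  | cons x xs ih =>
    have holcons : pvOl src (x :: xs) o =
        pvOl src xs (let o1 := PySem.Dict.setdefault o x 0;
          if 0 ≤ src then o1.modify x 0 (fun t => t + 1) else o1) := rfl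
    by_cases h0 : (0:Int) ≤ x
    · by_cases hx : x ∈ v
      · have hstep : pvStepB src (v, o, q) x =
            (v, (let o1 := PySem.Dict.setdefault o x 0;
              if 0 ≤ src then o1.modify x 0 (fun t => t + 1) else o1), q) := by
          simp [pvStepB, pvContains_eq, hx]
        have hnew : pvNewB v (x :: xs) = pvNewB v xs := by
          simp [pvNewB, List.filter_cons, hx]
        rw [List.foldl_cons, hstep, ih, holcons, hnew]
        have hupd : List.filter (fun y => decide (0 ≤ y)) (x :: xs) =
            x :: xs.filter (fun y => decide (0 ≤ y)) := by simp [h0]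
        rw [hupd, PySem.Set.update_cons, PySem.Set.add_of_mem hx]
      · have hadd : PySem.Set.add v x = v ++ [x] := PySem.Set.add_of_not_mem hx
        have hstep : pvStepB src (v, o, q) x =
            (v ++ [x], (let o1 := PySem.Dict.setdefault o x 0;
              if 0 ≤ src then o1.modify x 0 (fun t => t + 1) else o1), q ++ [x]) := by
          simp [pvStepB, pvContains_eq, hx, h0, hadd]
        have hnew : pvNewB v (x :: xs) = x :: pvNewB (v ++ [x]) xs := by
          have hf : List.filter (fun y => decide (0 ≤ y ∧ y ∉ v)) (x :: xs)
              = x :: xs.filter (fun y => decide (0 ≤ y ∧ y ∉ v)) := by simp [hx, h0]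
          simp only [pvNewB]
          rw [hf, PySem.Set.ofList_cons]
          congr 1
          simp only [PySem.Set.discard, pvOfListFilter, List.filter_filter]
          congr 1
          apply List.filter_congr
          intro y _
          by_cases hyx : y = x
          · subst hyx; simp
          · simp [hyx]
        rw [List.foldl_cons, hstep, ih, holcons, hnew]
        have hupd : List.filter (fun y => decide (0 ≤ y)) (x :: xs) =
            x :: xs.filter (fun y => decide (0 ≤ y)) := by simp [h0]
        rw [hupd, PySem.Set.update_cons, hadd]
        simp
    · have hstep : pvStepB src (v, o, q) x =
          (v, (let o1 := PySem.Dict.setdefault o x 0;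
            if 0 ≤ src then o1.modify x 0 (fun t => t + 1) else o1), q) := by
        simp [pvStepB, h0]
      have hnew : pvNewB v (x :: xs) = pvNewB v xs := by
        simp [pvNewB, List.filter_cons, h0]
      have hupd : List.filter (fun y => decide (0 ≤ y)) (x :: xs) =
          xs.filter (fun y => decide (0 ≤ y)) := by simp [h0]
      rw [List.foldl_cons, hstep, ih, holcons, hnew, hupd]

-- A's layered fold over a queue is the per-neighbour fold over the flattened stream
theorem pvLayerFlatten (g : List (Int × List Int)) (layer : List Int)
    (st : PySem.Set Int × List Int) :
    layer.foldl (getOutboundsInner g) st = (layer.flatMap (pvNbs g)).foldl pvStepA st := by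
  induction layer generalizing st with
  | nil => rfl
  | cons s ls ih =>
    rw [List.foldl_cons, ih, pvInner_eq, List.flatMap_cons, List.foldl_append]

theorem pvLayerA (g : List (Int × List Int)) (layer : List Int) (r : PySem.Set Int) :
    layer.foldl (getOutboundsInner g) (r, ([] : List Int)) =
      (PySem.Set.update r (layer.flatMap (pvNbs g)), pvNewA r (layer.flatMap (pvNbs g))) := by
  rw [pvLayerFlatten, pvAfold]; rfl

-- equation lemmas for the two fueled loops
theorem pvBFS_nil (g : List (Int × List Int)) (f : Nat) (r : PySem.Set Int) :
    getOutboundsBFS g f r [] = r := by cases f <;> rfl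

theorem pvBFS_cons (g : List (Int × List Int)) (f : Nat) (r : PySem.Set Int) (x : Int)
    (q : List Int) :
    getOutboundsBFS g (f + 1) r (x :: q) =
      getOutboundsBFS g f (PySem.Set.update r ((x :: q).flatMap (pvNbs g)))
        (pvNewA r ((x :: q).flatMap (pvNbs g))) := by
  show getOutboundsBFS g f ((x :: q).foldl (getOutboundsInner g) (r, [])).1
      ((x :: q).foldl (getOutboundsInner g) (r, [])).2 = _
  rw [pvLayerA]

theorem pvAlt_nil (g : List (Int × List Int)) (f : Nat) (v : PySem.Set Int)
    (o : PySem.Dict Int Int) : getOutboundsAltLoop g f v o [] = o := by cases f <;> rfl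

theorem pvAlt_cons (g : List (Int × List Int)) (f : Nat) (v : PySem.Set Int)
    (o : PySem.Dict Int Int) (s : Int) (rest : List Int) :
    getOutboundsAltLoop g (f + 1) v o (s :: rest) =
      getOutboundsAltLoop g f (PySem.Set.update v (((pvNbs g s)).filter (fun y => decide (0 ≤ y))))
        (pvOl s (pvNbs g s) o) (rest ++ pvNewB v (pvNbs g s)) := by
  show getOutboundsAltLoop g f ((pvNbs g s).foldl (pvStepB s) (v, o, rest)).1
      ((pvNbs g s).foldl (pvStepB s) (v, o, rest)).2.1
      ((pvNbs g s).foldl (pvStepB s) (v, o, rest)).2.2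
      = _
  rw [pvBfold]

-- composing pvNewB over an appended stream
theorem pvNewB_append (v : PySem.Set Int) (l1 l2 : List Int) :
    pvNewB v (l1 ++ l2) =
      pvNewB v l1 ++ pvNewB (PySem.Set.update v (l1.filter (fun y => decide (0 ≤ y)))) l2 := by
  have h1 := pvBfold (l1 ++ l2) 0 v PySem.Dict.empty []
  have h2 := pvBfold l1 0 v PySem.Dict.empty []
  have h3 := pvBfold l2 0 (PySem.Set.update v (l1.filter (fun y => decide (0 ≤ y))))
    (pvOl 0 l1 PySem.Dict.empty) (pvNewB v l1)
  rw [List.foldl_append, h2] at h1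
  simp only [List.nil_append] at h1
  rw [h3] at h1
  have := congrArg (fun t => t.2.2) h1
  simpa using this.symm

-- the dict-transform of one processed source, folded over a layer
def pvOupL (g : List (Int × List Int)) (layer : List Int) (o : PySem.Dict Int Int) :
    PySem.Dict Int Int :=
  layer.foldl (fun o s => pvOl s (pvNbs g s) o) o

-- B's loop, run for exactly one layer of its queue
theorem pvChunkB (g : List (Int × List Int)) (layer : List Int) (f : Nat)
    (v : PySem.Set Int) (o : PySem.Dict Int Int) (acc : List Int) :
    getOutboundsAltLoop g (f + layer.length) v o (layer ++ acc) =
      getOutboundsAltLoop g f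
        (PySem.Set.update v ((layer.flatMap (pvNbs g)).filter (fun y => decide (0 ≤ y))))
        (pvOupL g layer o)
        (acc ++ pvNewB v (layer.flatMap (pvNbs g))) := by
  induction layer generalizing v o acc with
  | nil => simp [pvOupL, pvNewB, PySem.Set.update_nil, PySem.Set.ofList_nil]
  | cons s ls ih =>
    have hfe : f + (s :: ls).length = (f + ls.length) + 1 := by simp; omega
    rw [hfe, List.cons_append, pvAlt_cons, List.append_assoc, ih]
    have hq : pvNewB v ((s :: ls).flatMap (pvNbs g)) =
        pvNewB v (pvNbs g s) ++
          pvNewB (PySem.Set.update v ((pvNbs g s).filter (fun y => decide (0 ≤ y))))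
            (ls.flatMap (pvNbs g)) := by
      rw [List.flatMap_cons, pvNewB_append]
    have hv : PySem.Set.update v (((s :: ls).flatMap (pvNbs g)).filter (fun y => decide (0 ≤ y)))
        = PySem.Set.update
            (PySem.Set.update v ((pvNbs g s).filter (fun y => decide (0 ≤ y))))
            ((ls.flatMap (pvNbs g)).filter (fun y => decide (0 ≤ y))) := by
      rw [List.flatMap_cons, List.filter_append, PySem.Set.update_append]
    rw [hq, hv, List.append_assoc]
    rfl

-- neighbour values live in the flattened value lists of the graph
theorem pvNbs_subset (g : List (Int × List Int)) (s y : Int) (h : y ∈ pvNbs g s) :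
    y ∈ g.flatMap (fun p => p.2) := by
  induction g with
  | nil => simp [pvNbs, PySem.Dict.getD_eq_get?_getD] at h; exact absurd h (by simp [PySem.Dict.get?])
  | cons p rest ih =>
    rw [List.flatMap_cons, List.mem_append]
    obtain ⟨k, vs⟩ := p
    rw [pvNbs, PySem.Dict.getD_eq_get?_getD] at h
    rw [PySem.Dict.get?_mk_cons] at h
    by_cases hk : (k == s) = true
    · rw [if_pos hk] at h; exact Or.inl (by simpa using h)
    · rw [if_neg hk] at h
      exact Or.inr (ih (by rw [pvNbs, PySem.Dict.getD_eq_get?_getD]; exact h))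

-- the universe every discovered/enqueued value lives in
def pvU (g : List (Int × List Int)) (out : Int) : PySem.Set Int :=
  PySem.Set.ofList (out :: g.flatMap (fun p => p.2))

theorem pvE_subset_U (g : List (Int × List Int)) (out : Int) (q : List Int) (y : Int)
    (h : y ∈ q.flatMap (pvNbs g)) : y ∈ pvU g out := by
  rw [List.mem_flatMap] at h
  obtain ⟨s, _, hy⟩ := h
  have := pvNbs_subset g s y hy
  simp [pvU, PySem.Set.mem_ofList, this]

-- removing distinct fresh elements from the remaining universe
theorem pvDiffDrop (U v a : List Int) (hU : U.Nodup) (ha : a.Nodup)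
    (h : ∀ x ∈ a, x ∈ U ∧ x ∉ v) :
    (PySem.Set.diff U (v ++ a)).length + a.length = (PySem.Set.diff U v).length := by
  have hsplit : PySem.Set.diff U (v ++ a)
      = (PySem.Set.diff U v).filter (fun x => !PySem.Set.contains a x) := by
    simp only [PySem.Set.diff, List.filter_filter]
    apply List.filter_congr
    intro x _
    rw [pvNotContains, pvNotContains, pvNotContains]
    by_cases hxv : x ∈ v <;> by_cases hxa : x ∈ a <;> simp [hxv, hxa]
  have hnd : (PySem.Set.diff U v).Nodup := List.Nodup.filter _ hU
  have hmem : ∀ x, x ∈ (PySem.Set.diff U v).filter (fun x => PySem.Set.contains a x) ↔ x ∈ a := by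
    intro x
    simp only [PySem.Set.diff, List.mem_filter, pvContains_eq, pvNotContains, decide_eq_true_eq]
    constructor
    · exact fun hh => hh.2
    · intro hx; have := h x hx; simp only [Bool.not_eq_eq_eq_not, Bool.not_true,
        decide_eq_false_iff_not]; tauto
  have hperm : ((PySem.Set.diff U v).filter (fun x => PySem.Set.contains a x)).Perm a :=
    (List.perm_ext_iff_of_nodup (List.Nodup.filter _ hnd) ha).2 hmem
  have hlen : ((PySem.Set.diff U v).filter (fun x => PySem.Set.contains a x)).length = a.length :=
    hperm.length_eq
  have htot : ((PySem.Set.diff U v).filter (fun x => !PySem.Set.contains a x)).length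
      + ((PySem.Set.diff U v).filter (fun x => PySem.Set.contains a x)).length
      = (PySem.Set.diff U v).length := by
    rw [← List.countP_eq_length_filter, ← List.countP_eq_length_filter]
    have := List.length_eq_countP_add_countP (p := fun x => !PySem.Set.contains a x)
      (l := PySem.Set.diff U v)
    have hnn : (PySem.Set.diff U v).countP (fun x => decide ¬(!PySem.Set.contains a x) = true)
        = (PySem.Set.diff U v).countP (fun x => PySem.Set.contains a x) := by
      apply List.countP_congr; intro x _; cases PySem.Set.contains a x <;> simp
    omega
  rw [hsplit, hlen] at *
  omega

-- r is a prefix of the BFS result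
theorem pvPrefixBFS (g : List (Int × List Int)) (f : Nat) (r : PySem.Set Int) (q : List Int) :
    r <+: getOutboundsBFS g f r q := by
  induction f generalizing r q with
  | zero => cases q <;> exact List.prefix_refl _
  | succ f ih =>
    cases q with
    | nil => exact List.prefix_refl _
    | cons x qs =>
      rw [pvBFS_cons]
      refine List.IsPrefix.trans ?_ (ih _ _)
      rw [PySem.Set.update_eq_append_filter]
      exact List.prefix_append _ _

-- total in-degree contribution of a list of sources
def pvCnt (g : List (Int × List Int)) (ss : List Int) (k : Int) : Int :=
  (ss.map (fun s => ((pvNbs g s).count k : Int))).sum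

theorem pvOl_keys (src : Int) (l : List Int) (o : PySem.Dict Int Int) :
    (pvOl src l o).keys = PySem.Set.update o.keys l := by
  induction l generalizing o with
  | nil => rfl
  | cons x xs ih =>
    have hstep : ((let o1 := PySem.Dict.setdefault o x 0;
        if 0 ≤ src then o1.modify x 0 (fun t => t + 1) else o1) : PySem.Dict Int Int).keys
        = PySem.Set.add o.keys x := by
      by_cases hc : o.contains x = true
      · have hmem : x ∈ o.keys := (PySem.Dict.contains_iff_mem_keys o x).1 hc
        rw [PySem.Dict.setdefault_of_contains o 0 hc]
        by_cases hs : (0:Int) ≤ src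
        · rw [if_pos hs, PySem.Dict.keys_modify,
            PySem.Dict.keys_insert_of_contains _ _ hc, PySem.Set.add_of_mem hmem]
        · rw [if_neg hs, PySem.Set.add_of_mem hmem]
      · have hmem : x ∉ o.keys := fun hm => hc ((PySem.Dict.contains_iff_mem_keys o x).2 hm)
        rw [PySem.Dict.setdefault_of_not_contains o 0 (by simpa using hc)]
        have hkins : (o.insert x 0).keys = o.keys ++ [x] :=
          PySem.Dict.keys_insert_of_not_contains _ _ (by simpa using hc)
        by_cases hs : (0:Int) ≤ src
        · rw [if_pos hs, PySem.Dict.keys_modify,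
            PySem.Dict.keys_insert_of_contains _ _ (PySem.Dict.contains_insert_self o x 0),
            hkins, PySem.Set.add_of_not_mem hmem]
        · rw [if_neg hs, hkins, PySem.Set.add_of_not_mem hmem]
    show (pvOl src xs _).keys = _
    rw [ih, hstep, PySem.Set.update_cons]

theorem pvOl_getD (src : Int) (l : List Int) (o : PySem.Dict Int Int) (k : Int) :
    (pvOl src l o).getD k 0 =
      o.getD k 0 + (if 0 ≤ src then (l.count k : Int) else 0) := by
  induction l generalizing o with
  | nil => simp [pvOl]
  | cons x xs ih =>
    have hsd : ∀ k' : Int, (PySem.Dict.setdefault o x 0).getD k' 0 = o.getD k' 0 := by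
      intro k'
      by_cases hk : k' = x
      · subst hk; exact PySem.Dict.getD_setdefault_self o k' 0 0
      · rw [PySem.Dict.getD_eq_get?_getD, PySem.Dict.get?_setdefault_of_ne o 0 hk,
          ← PySem.Dict.getD_eq_get?_getD]
    have hstep : ∀ k' : Int, ((let o1 := PySem.Dict.setdefault o x 0;
        if 0 ≤ src then o1.modify x 0 (fun t => t + 1) else o1) : PySem.Dict Int Int).getD k' 0
        = o.getD k' 0 + (if 0 ≤ src ∧ k' = x then 1 else 0) := by
      intro k'
      by_cases hs : (0:Int) ≤ src
      · simp only [if_pos hs, PySem.Dict.getD_modify, hsd]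
        by_cases hk : k' = x <;> simp [hk, hs]
      · simp only [if_neg hs, hsd]
        simp [hs]
    show (pvOl src xs _).getD k 0 = _
    rw [ih, hstep]
    by_cases hs : (0:Int) ≤ src
    · by_cases hk : k = x
      · subst hk
        simp [hs]
        ring
      · have hbe : (k == x) = false := by simp [hk]
        simp [hs, hk, List.count_cons, hbe]
        exact fun h => hk h.symm
    · simp [hs]

theorem pvOupL_keys (g : List (Int × List Int)) (layer : List Int) (o : PySem.Dict Int Int) :
    (pvOupL g layer o).keys = PySem.Set.update o.keys (layer.flatMap (pvNbs g)) := by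
  induction layer generalizing o with
  | nil => rfl
  | cons s ls ih =>
    show (pvOupL g ls (pvOl s (pvNbs g s) o)).keys = _
    rw [ih, pvOl_keys, List.flatMap_cons, PySem.Set.update_append]

theorem pvOupL_getD (g : List (Int × List Int)) (layer : List Int) (o : PySem.Dict Int Int)
    (k : Int) :
    (pvOupL g layer o).getD k 0 =
      o.getD k 0 + pvCnt g (layer.filter (fun s => decide (0 ≤ s))) k := by
  induction layer generalizing o with
  | nil => simp [pvOupL, pvCnt]
  | cons s ls ih =>
    show (pvOupL g ls (pvOl s (pvNbs g s) o)).getD k 0 = _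
    rw [ih, pvOl_getD]
    by_cases hs : (0:Int) ≤ s
    · have hd : decide (0 ≤ s) = true := by simp [hs]
      simp only [if_pos hs, List.filter_cons, hd, if_true, pvCnt, List.map_cons, List.sum_cons]
      ring
    · have hd : decide (0 ≤ s) = false := by simp [hs]
      simp [if_neg hs, List.filter_cons, hd]

theorem pvNodupBFS (g : List (Int × List Int)) (f : Nat) (r : PySem.Set Int) (q : List Int)
    (h : r.Nodup) : (getOutboundsBFS g f r q).Nodup := by
  induction f generalizing r q with
  | zero => cases q <;> exact h
  | succ f ih =>
    cases q with
    | nil => exact h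
    | cons x qs =>
      rw [pvBFS_cons]
      exact ih _ _ (PySem.Set.nodup_update _ _ h)

-- on termination, every counted source has all its neighbours inside the result
theorem pvClosedBFS (g : List (Int × List Int)) (out : Int) (f : Nat) (r : PySem.Set Int)
    (q : List Int) (hnd : r.Nodup)
    (hf : ((pvU g out).diff r).length + 1 ≤ f)
    (hcl : ∀ s : Int, 0 ≤ s → (s = out ∨ s ∈ r) → (s ∈ q ∨ ∀ y ∈ pvNbs g s, y ∈ r)) :
    ∀ s : Int, 0 ≤ s → (s = out ∨ s ∈ getOutboundsBFS g f r q) →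
      ∀ y ∈ pvNbs g s, y ∈ getOutboundsBFS g f r q := by
  induction f generalizing r q with
  | zero => omega
  | succ f ih =>
    cases q with
    | nil =>
      rw [pvBFS_nil]
      intro s h0 hs y hy
      rcases hcl s h0 hs with hq | hc
      · exact absurd hq (List.not_mem_nil)
      · exact hc y hy
    | cons x qs =>
      rw [pvBFS_cons]
      set E := (x :: qs).flatMap (pvNbs g) with hE
      set D := List.filter (fun y => !PySem.Set.contains r y) (PySem.Set.ofList E) with hD
      have hupd : PySem.Set.update r E = r ++ D := PySem.Set.update_eq_append_filter r E
      have hDmem : ∀ y ∈ D, y ∈ E ∧ y ∉ r := by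
        intro y hy
        rw [hD, List.mem_filter, pvNotContains] at hy
        exact ⟨(PySem.Set.mem_ofList _ y).1 hy.1, by simpa using hy.2⟩
      have hcl' : ∀ s : Int, 0 ≤ s → (s = out ∨ s ∈ PySem.Set.update r E) →
          (s ∈ pvNewA r E ∨ ∀ y ∈ pvNbs g s, y ∈ PySem.Set.update r E) := by
        intro s h0 hs
        by_cases hor : s = out ∨ s ∈ r
        · rcases hcl s h0 hor with hq | hc
          · refine Or.inr (fun y hy => ?_)
            have : y ∈ E := List.mem_flatMap.2 ⟨s, hq, hy⟩
            exact (PySem.Set.mem_update r E y).2 (Or.inr this)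
          · exact Or.inr (fun y hy => (PySem.Set.mem_update r E y).2 (Or.inl (hc y hy)))
        · push_neg at hor
          have hsr : s ∉ r := hor.2
          have hsE : s ∈ E := by
            rcases hs with h1 | h1
            · exact absurd h1 hor.1
            · rcases (PySem.Set.mem_update r E s).1 h1 with h2 | h2
              · exact absurd h2 hsr
              · exact h2
          refine Or.inl ?_
          rw [pvNewA, PySem.Set.mem_ofList, List.mem_filter]
          exact ⟨hsE, by simp [hsr, h0]⟩
      by_cases hDnil : D = []
      · have hrE : PySem.Set.update r E = r := by rw [hupd, hDnil, List.append_nil]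
        have hnew : pvNewA r E = [] := by
          rw [List.eq_nil_iff_forall_not_mem]
          intro y hy
          rw [pvNewA, PySem.Set.mem_ofList, List.mem_filter, decide_eq_true_eq] at hy
          have : y ∈ D := by
            rw [hD, List.mem_filter, pvNotContains]
            exact ⟨(PySem.Set.mem_ofList _ y).2 hy.1, by simp [hy.2.1]⟩
          rw [hDnil] at this
          exact absurd this (List.not_mem_nil)
        rw [hrE, hnew, pvBFS_nil]
        intro s h0 hs y hy
        have := hcl' s h0 (by rw [hrE]; exact hs)
        rw [hnew, hrE] at this
        rcases this with hq | hc
        · exact absurd hq (List.not_mem_nil)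
        · exact hc y hy
      · apply ih (PySem.Set.update r E) (pvNewA r E) (PySem.Set.nodup_update _ _ hnd) ?_ hcl'
        have hdrop := pvDiffDrop (pvU g out) r D (PySem.Set.nodup_ofList _)
          (List.Nodup.filter _ (PySem.Set.nodup_ofList _))
          (fun x hx => ⟨pvE_subset_U g out _ x (hDmem x hx).1, (hDmem x hx).2⟩)
        have hpos : 0 < D.length := List.length_pos_of_ne_nil hDnil
        rw [hupd]
        omega

theorem pvCnt_append (g : List (Int × List Int)) (a b : List Int) (k : Int) :
    pvCnt g (a ++ b) k = pvCnt g a k + pvCnt g b k := by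
  simp [pvCnt]

-- the coupled induction: B's fused loop against A's layered BFS
theorem pvMaster (g : List (Int × List Int)) (out : Int) (fA : Nat) :
    ∀ (r : PySem.Set Int) (qA qB : List Int) (v : PySem.Set Int) (o : PySem.Dict Int Int),
    r.Nodup →
    o.keys = r →
    (∀ y : Int, y ∈ v ↔ (y = out ∨ (y ∈ r ∧ 0 ≤ y))) →
    (∀ y ∈ pvNbs g out, y ∈ r ∨ y ∈ qA.flatMap (pvNbs g)) →
    (qA = qB ∨ (0 ≤ out ∧ (∀ y ∈ pvNbs g out, y ∈ r) ∧
        ∃ q1 q2, qA = q1 ++ out :: q2 ∧ qB = q1 ++ q2)) →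
    ((pvU g out).diff r).length + 1 ≤ fA →
    ∀ fB : Nat, qB.length + ((pvU g out).diff v).length ≤ fB →
    (getOutboundsAltLoop g fB v o qB).items =
      (getOutboundsBFS g fA r qA).map (fun k => (k, o.getD k 0 +
        pvCnt g (qB.filter (fun s => decide (0 ≤ s)) ++
          ((getOutboundsBFS g fA r qA).drop r.length).filter
            (fun y => decide (0 ≤ y ∧ y ≠ out))) k)) := by
  induction fA with
  | zero => intro r qA qB v o _ _ _ _ _ hfA; omega
  | succ fA ih =>
    intro r qA qB v o hnd hkeys hv h6 h3 hfA fB hfB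
    have hvout : out ∈ v := (hv out).2 (Or.inl rfl)
    cases qA with
    | nil =>
      have hqB : qB = [] := by
        rcases h3 with h | ⟨_, _, q1, q2, hqa, _⟩
        · exact h.symm
        · exact absurd hqa.symm (List.append_ne_nil_of_right_ne_nil q1 (by simp))
      subst hqB
      rw [pvBFS_nil, pvAlt_nil, PySem.Dict.items_eq_map_keys o (hkeys ▸ hnd) 0, hkeys]
      apply List.map_congr_left
      intro k _
      simp [pvCnt, List.drop_length]
    | cons x qs =>
      -- A processes the layer x :: qs, B processes its whole current queue qB
      set EA := (x :: qs).flatMap (pvNbs g) with hEAdef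
      set EB := qB.flatMap (pvNbs g) with hEBdef
      rw [pvBFS_cons]
      -- the four stream comparisons between A's layer and B's queue
      have hEBA : ∀ y ∈ EB, y ∈ EA := by
        rcases h3 with h | ⟨_, _, q1, q2, hqa, hqb⟩
        · rw [hEBdef, hEAdef, ← h]; exact fun y hy => hy
        · intro y hy
          rw [hEBdef, hqb, List.flatMap_append, List.mem_append] at hy
          rw [hEAdef, hqa, List.flatMap_append, List.flatMap_cons, List.mem_append,
            List.mem_append]
          tauto
      have hEAB : ∀ y ∈ EA, y ∈ EB ∨ (y ∈ r ∧ (0 ≤ y → y ∈ v)) := by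
        rcases h3 with h | ⟨_, hout, q1, q2, hqa, hqb⟩
        · rw [hEBdef, hEAdef, ← h]; exact fun y hy => Or.inl hy
        · intro y hy
          rw [hEAdef, hqa, List.flatMap_append, List.flatMap_cons, List.mem_append,
            List.mem_append] at hy
          rcases hy with h1 | h1 | h1
          · exact Or.inl (by rw [hEBdef, hqb, List.flatMap_append, List.mem_append]; tauto)
          · exact Or.inr ⟨hout y h1, fun h0 => (hv y).2 (Or.inr ⟨hout y h1, h0⟩)⟩
          · exact Or.inl (by rw [hEBdef, hqb, List.flatMap_append, List.mem_append]; tauto)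
      have hrEBA : PySem.Set.update r EB = PySem.Set.update r EA := by
        rcases h3 with h | ⟨_, hout, q1, q2, hqa, hqb⟩
        · rw [hEBdef, hEAdef, ← h]
        · rw [hEBdef, hEAdef, hqa, hqb, List.flatMap_append, List.flatMap_append,
            List.flatMap_cons, PySem.Set.update_append, PySem.Set.update_append,
            PySem.Set.update_append]
          congr 1
          exact (pvUpdate_of_subset _ _ (fun y hy =>
            (PySem.Set.mem_update _ _ y).2 (Or.inl (hout y hy)))).symm
      have hNB : pvNewB v EB = pvNewB v EA := by
        rcases h3 with h | ⟨_, hout, q1, q2, hqa, hqb⟩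
        · rw [hEBdef, hEAdef, ← h]
        · rw [pvNewB, pvNewB, hEBdef, hEAdef, hqa, hqb, List.flatMap_append,
            List.flatMap_append, List.flatMap_cons]
          congr 1
          rw [List.filter_append, List.filter_append, List.filter_append]
          congr 1
          have : List.filter (fun y => decide (0 ≤ y ∧ y ∉ v)) (pvNbs g out) = [] := by
            rw [List.filter_eq_nil_iff]
            intro y hy
            simp only [decide_eq_true_eq, not_and, not_not]
            intro h0
            exact (hv y).2 (Or.inr ⟨hout y hy, h0⟩)
          rw [this, List.nil_append]
      -- B's one-layer step
      obtain ⟨fB', hfB'⟩ : ∃ fB', fB = fB' + qB.length := ⟨fB - qB.length, by omega⟩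
      have hch := pvChunkB g qB fB' v o []
      rw [List.append_nil, List.nil_append] at hch
      rw [hfB', hch, ← hEBdef, hNB]
      set v' := PySem.Set.update v (EB.filter (fun y => decide (0 ≤ y))) with hv'def
      set o' := pvOupL g qB o with ho'def
      set r' := PySem.Set.update r EA with hr'def
      set qA' := pvNewA r EA with hqA'def
      set qB' := pvNewB v EA with hqB'def
      set DA := List.filter (fun y => !PySem.Set.contains r y) (PySem.Set.ofList EA) with hDAdef
      have hD : r' = r ++ DA := PySem.Set.update_eq_append_filter r EA
      have hqA'mem : ∀ y, y ∈ qA' ↔ (y ∈ EA ∧ y ∉ r ∧ 0 ≤ y) := by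
        intro y
        rw [hqA'def, pvNewA, PySem.Set.mem_ofList, List.mem_filter, decide_eq_true_eq]
      have hqB'mem : ∀ y, y ∈ qB' ↔ (y ∈ EA ∧ 0 ≤ y ∧ y ∉ v) := by
        intro y
        rw [hqB'def, pvNewB, PySem.Set.mem_ofList, List.mem_filter, decide_eq_true_eq]
      have hqB'eq : qB' = qA'.filter (fun y => decide (y ≠ out)) := by
        rw [hqB'def, hqA'def, pvNewB, pvNewA, pvOfListFilter, List.filter_filter]
        congr 1
        apply List.filter_congr
        intro y _
        by_cases h0 : (0:Int) ≤ y <;> by_cases hyo : y = out <;>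
          by_cases hyr : y ∈ r <;>
          simp [h0, hyo, hyr, hv y, hvout]
      have hDAmem : ∀ y ∈ DA, y ∈ EA ∧ y ∉ r := by
        intro y hy
        rw [hDAdef, List.mem_filter, pvNotContains] at hy
        exact ⟨(PySem.Set.mem_ofList _ y).1 hy.1, by simpa using hy.2⟩
      have hDAnodup : DA.Nodup := List.Nodup.filter _ (PySem.Set.nodup_ofList _)
      have hqA'nodup : qA'.Nodup := PySem.Set.nodup_ofList _
      -- new coupling data
      have hkeys' : o'.keys = r' := by
        rw [ho'def, pvOupL_keys, hkeys, ← hEBdef, hrEBA, hr'def]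
      have hnd' : r'.Nodup := PySem.Set.nodup_update _ _ hnd
      have hv'' : ∀ y : Int, y ∈ v' ↔ (y = out ∨ (y ∈ r' ∧ 0 ≤ y)) := by
        intro y
        rw [hv'def, PySem.Set.mem_update, List.mem_filter, decide_eq_true_eq]
        constructor
        · rintro (hyv | ⟨hyE, h0⟩)
          · rcases (hv y).1 hyv with h | ⟨hyr, h0⟩
            · exact Or.inl h
            · exact Or.inr ⟨(PySem.Set.mem_update _ _ y).2 (Or.inl hyr), h0⟩
          · exact Or.inr ⟨(PySem.Set.mem_update r EA y).2 (Or.inr (hEBA y hyE)), h0⟩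
        · rintro (h | ⟨hyr', h0⟩)
          · exact Or.inl ((hv y).2 (Or.inl h))
          · rw [hr'def, PySem.Set.mem_update] at hyr'
            rcases hyr' with hyr | hyE
            · exact Or.inl ((hv y).2 (Or.inr ⟨hyr, h0⟩))
            · rcases hEAB y hyE with hB | ⟨hyr, himp⟩
              · exact Or.inr ⟨hB, h0⟩
              · exact Or.inl (himp h0)
      have h6' : ∀ y ∈ pvNbs g out, y ∈ r' ∨ y ∈ qA'.flatMap (pvNbs g) := by
        intro y hy
        rcases h6 y hy with h | h
        · exact Or.inl (by rw [hr'def]; exact (PySem.Set.mem_update _ _ y).2 (Or.inl h))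
        · exact Or.inl (by rw [hr'def]; exact (PySem.Set.mem_update _ _ y).2 (Or.inr h))
      have h3' : qA' = qB' ∨ (0 ≤ out ∧ (∀ y ∈ pvNbs g out, y ∈ r') ∧
          ∃ q1 q2, qA' = q1 ++ out :: q2 ∧ qB' = q1 ++ q2) := by
        by_cases hout' : out ∈ qA'
        · refine Or.inr ⟨((hqA'mem out).1 hout').2.2, ?_, ?_⟩
          · intro y hy
            rcases h6 y hy with h | h
            · rw [hr'def]; exact (PySem.Set.mem_update _ _ y).2 (Or.inl h)
            · rw [hr'def]; exact (PySem.Set.mem_update _ _ y).2 (Or.inr h)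
          · obtain ⟨u1, u2, h12⟩ := List.append_of_mem hout'
            refine ⟨u1, u2, h12, ?_⟩
            have hnd12 := h12 ▸ hqA'nodup
            have hout1 : out ∉ u1 := by
              intro hm
              have := List.disjoint_of_nodup_append hnd12
              exact this hm (by simp)
            have hout2 : out ∉ u2 := by
              have := (List.nodup_append.1 hnd12).2.1
              simp at this
              exact this.1
            rw [hqB'eq, h12, List.filter_append, List.filter_cons]
            simp only [decide_eq_true_eq]
            rw [if_neg (by simp)]
            congr 1
            · rw [List.filter_eq_self]
              intro y hy
              simp only [decide_eq_true_eq]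
              exact fun he => hout1 (he ▸ hy)
            · rw [List.filter_eq_self]
              intro y hy
              simp only [decide_eq_true_eq]
              exact fun he => hout2 (he ▸ hy)
        · refine Or.inl ?_
          rw [hqB'eq, List.filter_eq_self.2 ?_]
          intro y hy
          simp only [decide_eq_true_eq]
          exact fun he => hout' (he ▸ hy)
      -- v grows by exactly the newly enqueued nodes
      have haddB : v' = v ++ qB' := by
        rw [hv'def, PySem.Set.update_eq_append_filter, ← hNB, pvNewB,
          pvOfListFilter, List.filter_filter]
        congr 2
        apply List.filter_congr
        intro y _
        rw [pvNotContains]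
        by_cases h0 : (0:Int) ≤ y <;> by_cases hyv : y ∈ v <;> simp [h0, hyv]
      have hqB'nodup : qB'.Nodup := PySem.Set.nodup_ofList _
      have hqB'U : ∀ y ∈ qB', y ∈ pvU g out ∧ y ∉ v := by
        intro y hy
        have := (hqB'mem y).1 hy
        exact ⟨pvE_subset_U g out (x :: qs) y this.1, this.2.2⟩
      have hdropB := pvDiffDrop (pvU g out) v qB' (PySem.Set.nodup_ofList _) hqB'nodup hqB'U
      by_cases hDAnil : DA = []
      · -- nothing new was discovered: both loops stop after this layer
        have hr'r : r' = r := by rw [hD, hDAnil, List.append_nil]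
        have hqA'nil : qA' = [] := by
          rw [List.eq_nil_iff_forall_not_mem]
          intro y hy
          have hm := (hqA'mem y).1 hy
          have : y ∈ DA := by
            rw [hDAdef, List.mem_filter, pvNotContains]
            exact ⟨(PySem.Set.mem_ofList _ y).2 hm.1, by simp [hm.2.1]⟩
          rw [hDAnil] at this
          exact absurd this (List.not_mem_nil)
        have hqB'nil : qB' = [] := by
          rw [hqB'eq, hqA'nil, List.filter_nil]
        rw [hqA'nil, hqB'nil, pvBFS_nil, pvAlt_nil, hr'r,
          PySem.Dict.items_eq_map_keys o' (by rw [hkeys', hr'r]; exact hnd) 0,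
          hkeys', hr'r]
        apply List.map_congr_left
        intro k _
        rw [ho'def, pvOupL_getD, List.drop_length]
        simp [pvCnt]
      · -- at least one new node: recurse
        have hDAU : ∀ y ∈ DA, y ∈ pvU g out ∧ y ∉ r := by
          intro y hy
          exact ⟨pvE_subset_U g out (x :: qs) y (hDAmem y hy).1, (hDAmem y hy).2⟩
        have hdropA := pvDiffDrop (pvU g out) r DA (PySem.Set.nodup_ofList _) hDAnodup hDAU
        have hDAlen : 0 < DA.length := List.length_pos_of_ne_nil hDAnil
        have hfA' : ((pvU g out).diff r').length + 1 ≤ fA := by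
          rw [hD]; omega
        have hfB'' : qB'.length + ((pvU g out).diff v').length ≤ fB' := by
          rw [haddB]; omega
        have hIH := ih r' qA' qB' v' o' hnd' hkeys' hv'' h6' h3' hfA' fB' hfB''
        rw [hIH]
        set R := getOutboundsBFS g fA r' qA' with hRdef
        have hpre : r' <+: R := pvPrefixBFS g fA r' qA'
        have hReq : R = r ++ (DA ++ R.drop r'.length) := by
          have h1 := List.prefix_iff_eq_append.1 hpre
          conv_lhs => rw [← h1]
          rw [hD, List.append_assoc]
        have hdropr : R.drop r.length = DA ++ R.drop r'.length := by
          conv_lhs => rw [hReq]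
          rw [List.drop_left]
        have hDAf : DA.filter (fun y => decide (0 ≤ y ∧ y ≠ out)) = qB' := by
          rw [hDAdef, hqB'def, pvNewB, pvOfListFilter, pvOfListFilter, List.filter_filter]
          congr 1
          apply List.filter_congr
          intro y _
          rw [pvNotContains]
          by_cases h0 : (0:Int) ≤ y <;> by_cases hyo : y = out <;>
            by_cases hyr : y ∈ r <;>
            simp [h0, hyo, hyr, hv y, hvout]
        have hqB'f : qB'.filter (fun s => decide (0 ≤ s)) = qB' := by
          rw [List.filter_eq_self]
          intro y hy
          simp [((hqB'mem y).1 hy).2.1]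
        apply List.map_congr_left
        intro k _
        rw [ho'def, pvOupL_getD, hqB'f, hdropr, List.filter_append, hDAf,
          pvCnt_append, pvCnt_append, pvCnt_append]
        ring_nf

theorem pvInsertZero_getD (l : List Int) (d : PySem.Dict Int Int)
    (h : ∀ k : Int, d.getD k 0 = 0) (k : Int) :
    (l.foldl (fun d i => d.insert i 0) d).getD k 0 = 0 := by
  induction l generalizing d with
  | nil => exact h k
  | cons x xs ih =>
    apply ih
    intro k'
    rw [PySem.Dict.getD_insert]
    by_cases hk : k' = x <;> simp [hk, h]

theorem pvIncL_keys (l : List Int) (d : PySem.Dict Int Int) (h : ∀ y ∈ l, y ∈ d.keys) :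
    (l.foldl (fun d i => d.modify i 0 (fun t => t + 1)) d).keys = d.keys := by
  induction l generalizing d with
  | nil => rfl
  | cons x xs ih =>
    have hc : d.contains x = true := (PySem.Dict.contains_iff_mem_keys d x).2 (h x (by simp))
    have hstep : (d.modify x 0 (fun t => t + 1)).keys = d.keys := by
      rw [PySem.Dict.keys_modify, PySem.Dict.keys_insert_of_contains _ _ hc]
    rw [List.foldl_cons, ih _ (by rw [hstep]; exact fun y hy => h y (by simp [hy])), hstep]

theorem pvIncL_getD (l : List Int) (d : PySem.Dict Int Int) (k : Int) :
    (l.foldl (fun d i => d.modify i 0 (fun t => t + 1)) d).getD k 0 =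
      d.getD k 0 + (l.count k : Int) := by
  induction l generalizing d with
  | nil => simp
  | cons x xs ih =>
    rw [List.foldl_cons, ih, PySem.Dict.getD_modify]
    by_cases hk : k = x
    · subst hk
      simp
      ring
    · have hbe : (k == x) = false := by simp [hk]
      simp [hk, List.count_cons]
      exact fun h => hk h.symm

-- A's second phase: zero-init then per-source increments
theorem pvPhase2 (g : List (Int × List Int)) (R : List Int) (ss : List Int)
    (d : PySem.Dict Int Int) (hkeys : d.keys = R)
    (hcl : ∀ s ∈ ss, 0 ≤ s → ∀ y ∈ pvNbs g s, y ∈ R) :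
    (ss.foldl (fun d out_id => if out_id < 0 then d
        else (pvNbs g out_id).foldl (fun d in_id => d.modify in_id 0 (fun t => t + 1)) d)
        d).keys = R ∧
    ∀ k : Int, (ss.foldl (fun d out_id => if out_id < 0 then d
        else (pvNbs g out_id).foldl (fun d in_id => d.modify in_id 0 (fun t => t + 1)) d)
        d).getD k 0 = d.getD k 0 + pvCnt g (ss.filter (fun s => decide (0 ≤ s))) k := by
  induction ss generalizing d with
  | nil => exact ⟨hkeys, by simp [pvCnt]⟩
  | cons s ls ih =>
    by_cases hs : s < 0
    · have hd : decide (0 ≤ s) = false := by simp; omega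
      have := ih d hkeys (fun s' hs' => hcl s' (by simp [hs']))
      rw [List.foldl_cons, if_pos hs]
      refine ⟨this.1, fun k => ?_⟩
      rw [this.2 k, List.filter_cons, hd]
      simp
    · have h0 : (0:Int) ≤ s := by omega
      have hd : decide (0 ≤ s) = true := by simp [h0]
      have hnbs : ∀ y ∈ pvNbs g s, y ∈ d.keys := by
        rw [hkeys]; exact hcl s (by simp) h0
      have hkeys' : ((pvNbs g s).foldl (fun d in_id => d.modify in_id 0 (fun t => t + 1))
          d).keys = R := by rw [pvIncL_keys _ _ hnbs, hkeys]
      have := ih _ hkeys' (fun s' hs' => hcl s' (by simp [hs']))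
      rw [List.foldl_cons, if_neg hs]
      refine ⟨this.1, fun k => ?_⟩
      rw [this.2 k, pvIncL_getD, List.filter_cons, hd]
      simp only [if_true, pvCnt, List.map_cons, List.sum_cons, pvCnt]
      ring

theorem get_outbounds_main : ∀ (graph : List (Int × List Int)) (out_layer_id : Int),
    get_outbounds graph out_layer_id = get_outbounds_alt graph out_layer_id := by
  intro g out
  set R := getOutboundsBFS g (pvFuel g) PySem.Set.empty [out] with hRdef
  have hndR : R.Nodup := pvNodupBFS g _ _ _ List.nodup_nil
  have hflat : (pvU g out).length ≤ (g.flatMap (fun p => p.2)).length + 1 := by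
    have := PySem.Set.length_ofList_le (out :: g.flatMap (fun p => p.2))
    simpa [pvU] using this
  have hfuelA : ((pvU g out).diff PySem.Set.empty).length + 1 ≤ pvFuel g := by
    have h1 : ((pvU g out).diff PySem.Set.empty).length ≤ (pvU g out).length :=
      List.length_filter_le _ _
    rw [pvFuel]
    omega
  have hclosed := pvClosedBFS g out (pvFuel g) PySem.Set.empty [out] List.nodup_nil hfuelA
    (by
      intro s _ hs
      rcases hs with h | h
      · exact Or.inl (by simp [h])
      · exact absurd h (List.not_mem_nil))
  -- characterise A
  have hA : get_outbounds g out =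
      ((PySem.Set.add R out).foldl (fun d out_id => if out_id < 0 then d
        else (pvNbs g out_id).foldl (fun d in_id => d.modify in_id 0 (fun t => t + 1)) d)
        (R.foldl (fun d i => d.insert i 0) PySem.Dict.empty)).items := rfl
  have hk0 : (R.foldl (fun d i => d.insert i 0)
      (PySem.Dict.empty : PySem.Dict Int Int)).keys = R := by
    rw [PySem.Dict.keys_foldl_insert (ν := Int) R (fun _ _ => (0:Int)), PySem.Dict.keys_empty]
    rw [PySem.Set.update_nil_left, PySem.Set.ofList_eq_self_of_nodup _ hndR]
  have hg0 : ∀ k : Int, (R.foldl (fun d i => d.insert i 0)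
      (PySem.Dict.empty : PySem.Dict Int Int)).getD k 0 = 0 :=
    pvInsertZero_getD R PySem.Dict.empty (fun k => PySem.Dict.getD_empty k 0)
  have hp2 := pvPhase2 g R (PySem.Set.add R out)
    (R.foldl (fun d i => d.insert i 0) (PySem.Dict.empty : PySem.Dict Int Int)) hk0
    (by
      intro s hsmem h0 y hy
      rcases (PySem.Set.mem_add R out s).1 hsmem with h | h
      · exact hclosed s h0 (Or.inr h) y hy
      · exact hclosed s h0 (Or.inl h) y hy)
  have hA2 : get_outbounds g out = R.map (fun k =>
      (k, pvCnt g ((PySem.Set.add R out).filter (fun s => decide (0 ≤ s))) k)) := by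
    rw [hA, PySem.Dict.items_eq_map_keys _ (by rw [hp2.1]; exact hndR) 0, hp2.1]
    apply List.map_congr_left
    intro k _
    rw [hp2.2 k, hg0 k]
    ring_nf
  -- characterise B via the coupled induction
  have hBrfl : get_outbounds_alt g out = (getOutboundsAltLoop g (pvFuel g)
      (PySem.Set.add PySem.Set.empty out) PySem.Dict.empty [out]).items := rfl
  have hvinit : PySem.Set.add PySem.Set.empty out = [out] := by
    show PySem.Set.add ([] : PySem.Set Int) out = [out]
    rw [PySem.Set.add_of_not_mem (List.not_mem_nil)]
    rfl
  have hfuelB : ([out] : List Int).length +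
      ((pvU g out).diff (PySem.Set.add PySem.Set.empty out)).length ≤ pvFuel g := by
    have h1 : ((pvU g out).diff (PySem.Set.add PySem.Set.empty out)).length
        ≤ (pvU g out).length := List.length_filter_le _ _
    rw [pvFuel]
    simp only [List.length_cons, List.length_nil]
    omega
  have hB := pvMaster g out (pvFuel g) PySem.Set.empty [out] [out]
    (PySem.Set.add PySem.Set.empty out) PySem.Dict.empty
    List.nodup_nil
    (by rw [PySem.Dict.keys_empty]; rfl)
    (by
      intro y
      rw [hvinit]
      simp)
    (by
      intro y hy
      exact Or.inr (by simp [hy]))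
    (Or.inl rfl)
    hfuelA
    (pvFuel g) hfuelB
  rw [hA2, hBrfl, hB, ← hRdef]
  apply List.map_congr_left
  intro k _
  have hperm : ((PySem.Set.add R out).filter (fun s => decide (0 ≤ s))).Perm
      (([out].filter (fun s => decide (0 ≤ s))) ++
        ((R.drop (PySem.Set.empty : PySem.Set Int).length).filter
          (fun y => decide (0 ≤ y ∧ y ≠ out)))) := by
    have hdrop0 : (R.drop (PySem.Set.empty : PySem.Set Int).length) = R := by
      show R.drop 0 = R
      simp
    rw [hdrop0]
    have hnd2 : (([out].filter (fun s => decide (0 ≤ s))) ++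
        (R.filter (fun y => decide (0 ≤ y ∧ y ≠ out)))).Nodup := by
      by_cases h0 : (0:Int) ≤ out
      · have h1 : (([out] : List Int).filter (fun s => decide (0 ≤ s))) = [out] := by simp [h0]
        rw [h1, List.nodup_append]
        refine ⟨List.nodup_singleton out, List.Nodup.filter _ hndR, ?_⟩
        intro b hb1
        simp only [List.mem_singleton] at hb1
        subst hb1
        intro c hc
        simp only [List.mem_filter, decide_eq_true_eq] at hc
        exact fun he => hc.2.2 he.symm
      · have h1 : (([out] : List Int).filter (fun s => decide (0 ≤ s))) = [] := by simp [h0]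
        rw [h1, List.nil_append]
        exact List.Nodup.filter _ hndR
    apply (List.perm_ext_iff_of_nodup
      (List.Nodup.filter _ (PySem.Set.nodup_add R out hndR)) hnd2).2
    intro a
    rw [List.mem_filter, List.mem_append, List.mem_filter, List.mem_filter,
      PySem.Set.mem_add]
    simp only [List.mem_singleton, decide_eq_true_eq]
    constructor
    · rintro ⟨h1 | h1, h0⟩
      · by_cases ha : a = out
        · exact Or.inl ⟨ha, h0⟩
        · exact Or.inr ⟨h1, h0, ha⟩
      · exact Or.inl ⟨h1, h0⟩
    · rintro (⟨h1, h0⟩ | ⟨h1, h0, _⟩)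
      · exact ⟨Or.inr h1, h0⟩
      · exact ⟨Or.inl h1, h0⟩
  have hsum : pvCnt g ((PySem.Set.add R out).filter (fun s => decide (0 ≤ s))) k =
      pvCnt g (([out].filter (fun s => decide (0 ≤ s))) ++
        ((R.drop (PySem.Set.empty : PySem.Set Int).length).filter
          (fun y => decide (0 ≤ y ∧ y ≠ out)))) k := by
    unfold pvCnt
    exact (hperm.map _).sum_eq
  rw [hsum, PySem.Dict.getD_empty]
  ring_nf

-- ===== VERDICT (by name: the statement is the Claim_ definition above) =====
theorem get_outbounds_spec : Claim_equal_get_outbounds := by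
  intro g out _ _
  unfold Spec_get_outbounds
  exact get_outbounds_main g out
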